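-- pv_equiv track=rewrite | github.com/PrairieLearn/PrairieLearn | apps/prairielearn/elements/pl-symbolic-input/pl-symbolic-input.py | _merge_spaced_tokens
-- ===== SOURCE A (Python) =====
-- def _merge_spaced_tokens(text: str, tokens: list[str]) -> str:
--     """
--     Replace space-separated versions of tokens with their unspaced form.
--
--     Example: "s i n ( x )" becomes "sin ( x )"
--
--     Returns:
--         The text with spaced tokens merged
--     """
--     result = []
--     i = 0
--     n = len(text)
--
--     # Precompute spaced forms and lengths
--     spaced = [(token, " ".join(token), len(" ".join(token))) for token in tokens]
--
--     # Sort by spaced_token length so longer tokens match first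
--     # e.g. "acosh" must be checked before "acos" to avoid partial matches.
--     spaced.sort(key=lambda x: -x[2])
--
--     while i < n:
--         matched = False
--
--         # Try each spaced token
--         for token, spaced_token, length in spaced:
--             if text.startswith(spaced_token, i):
--                 result.append(token)
--                 i += length
--                 matched = True
--                 break
--
--         if not matched:
--             result.append(text[i])
--             i += 1
--
--     return "".join(result)
-- ===== SOURCE B (Python) =====
-- def _starts_spaced(tok, s, i):
--     """Does s[i:] start with the space-interleaved form of tok? (char by char, no string building)"""
--     if not tok:
--         return True
--     if i >= len(s) or s[i] != tok[0]:
--         return False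
--     j = i + 1
--     for ch in tok[1:]:
--         if j + 1 >= len(s) or s[j] != " " or s[j + 1] != ch:
--             return False
--         j += 2
--     return True
--
--
-- def _merge_spaced_tokens(text, tokens):
--     out = []
--     i = 0
--     n = len(text)
--     while i < n:
--         c = text[i]
--         best = None
--         for tok in tokens:
--             if tok and tok[0] == c and (best is None or len(tok) > len(best)) and _starts_spaced(tok, text, i):
--                 best = tok
--         if best is None:
--             out.append(c)
--             i += 1
--         else:
--             out.append(best)
--             i += 2 * len(best) - 1
--     return "".join(out)
-- ===== Notes on version B (the rewrite author's own statement) =====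
-- stated objective: alternative
-- what changed: B drops A's precomputed spaced strings, stable sort and first-match-in-sorted-order scan, instead matching each token's spaced form char-by-char directly against the text and keeping the single longest match per position.
-- outside the precondition, e.g. on _merge_spaced_tokens('a b', ['', 'ab']): A returns 'ab', B returns 'ab'
import Mathlib
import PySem

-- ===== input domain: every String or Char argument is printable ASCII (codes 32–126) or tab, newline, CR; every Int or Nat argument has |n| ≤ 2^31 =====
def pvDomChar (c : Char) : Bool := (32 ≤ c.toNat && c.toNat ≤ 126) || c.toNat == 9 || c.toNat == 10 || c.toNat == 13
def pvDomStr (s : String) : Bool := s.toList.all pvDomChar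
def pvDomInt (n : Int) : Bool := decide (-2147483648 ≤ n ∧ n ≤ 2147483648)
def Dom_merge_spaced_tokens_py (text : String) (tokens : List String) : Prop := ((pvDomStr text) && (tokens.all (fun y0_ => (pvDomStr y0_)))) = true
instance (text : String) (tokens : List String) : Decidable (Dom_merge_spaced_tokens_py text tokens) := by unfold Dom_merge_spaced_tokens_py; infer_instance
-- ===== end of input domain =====

-- B replaces A's precomputed spaced strings + stable sort + first-match scan by a direct
-- char-interleaved matcher and a single longest-match scan per position (alternative algorithm, same cost).

-- ===== PORT A =====
-- " ".join(token)
def pvSpacedA (tok : List Char) : List Char := PySem.Chars.join [' '] (tok.map (fun c => [c]))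

-- the inner `for token, spaced_token, length in spaced: if text.startswith(spaced_token, i): … break`
def pvFirstMatch (rest : List Char) : List (List Char × List Char × Nat) → Option (List Char × List Char × Nat)
  | [] => none
  | x :: xs => if PySem.Chars.startswith rest x.2.1 then some x else pvFirstMatch rest xs

-- the `while i < n` loop; the position i is carried as the remaining suffix of text,
-- fuel makes the recursion total (Python diverges when an empty token is in `tokens`; excluded by Pre_)
def pvLoopA (sp : List (List Char × List Char × Nat)) : Nat → List Char → List Char
  | _, [] => []
  | 0, _ :: _ => []
  | fuel + 1, c :: rs =>
    match pvFirstMatch (c :: rs) sp with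
    | some (tok, _, len) => tok ++ pvLoopA sp fuel ((c :: rs).drop len)
    | none => c :: pvLoopA sp fuel rs

def merge_spaced_tokens_py (text : String) (tokens : List String) : String :=
  let spaced := tokens.map (fun t => (t.toList, pvSpacedA t.toList, (pvSpacedA t.toList).length))
  let sortedSp := PySem.List.sorted spaced (fun x => -(x.2.2 : Int)) false
  String.mk (pvLoopA sortedSp text.toList.length text.toList)

-- ===== PORT B =====
-- _starts_spaced: does `rest` start with the space-interleaved form of tok? (char by char)
def pvStartsSpaced : List Char → List Char → Bool
  | [], _ => true
  | [c], s => match s with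
    | d :: _ => c == d
    | [] => false
  | c :: c2 :: t, s => match s with
    | d :: e :: s' => c == d && e == ' ' && pvStartsSpaced (c2 :: t) s'
    | _ => false

-- the `for tok in tokens` pass keeping the longest matching token
-- (`tok[0] == c` is the cheap first-char pre-filter; `c = text[i]` is `rest.head?`)
def pvBest (tokens : List (List Char)) (rest : List Char) : Option (List Char) :=
  tokens.foldl
    (fun best tok =>
      if (!tok.isEmpty) && (tok.head? == rest.head?)
          && (match best with | none => true | some b => b.length < tok.length)
          && pvStartsSpaced tok rest then some tok else best)
    none

def pvLoopB (toks : List (List Char)) : Nat → List Char → List Char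
  | _, [] => []
  | 0, _ :: _ => []
  | fuel + 1, c :: rs =>
    match pvBest toks (c :: rs) with
    | some tok => tok ++ pvLoopB toks fuel ((c :: rs).drop (2 * tok.length - 1))
    | none => c :: pvLoopB toks fuel rs

def merge_spaced_tokens_py_alt (text : String) (tokens : List String) : String :=
  String.mk (pvLoopB (tokens.map String.toList) text.toList.length text.toList)

-- ===== PRECONDITION & SPEC =====
-- Pre_ excludes the inputs on which A can loop forever: an empty token whose spaced form ""
-- matches at a position no other token covers advances i by 0. It conservatively admits an empty
-- token only when text is empty or every character of text is itself a token (then A terminates),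
-- so some terminating inputs with an empty token are still excluded.
def Pre_merge_spaced_tokens_py (text : String) (tokens : List String) : Prop :=
  text = "" ∨ (∀ t ∈ tokens, t ≠ "") ∨ (∀ c ∈ text.toList, [c] ∈ tokens.map String.toList)
instance (text : String) (tokens : List String) : Decidable (Pre_merge_spaced_tokens_py text tokens) := by
  unfold Pre_merge_spaced_tokens_py; infer_instance

def pvWitness_merge_spaced_tokens_py : String × List String := ("s i n ( x )", ["sin", "cos"])

def Spec_merge_spaced_tokens_py (text : String) (tokens : List String) (out : String) : Prop := out = merge_spaced_tokens_py_alt text tokens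
instance (text : String) (tokens : List String) (out : String) : Decidable (Spec_merge_spaced_tokens_py text tokens out) := by unfold Spec_merge_spaced_tokens_py; infer_instance

-- ===== CLAIM (what is proved, stated in full; the proofs are below) =====
def Claim_equal_merge_spaced_tokens_py : Prop := ∀ (text : String) (tokens : List String), Dom_merge_spaced_tokens_py text tokens → Pre_merge_spaced_tokens_py text tokens → Spec_merge_spaced_tokens_py text tokens (merge_spaced_tokens_py text tokens)

-- ===== LEMMAS AND PROOFS =====

theorem pvSpacedA_nil : pvSpacedA [] = [] := by
  simp [pvSpacedA, PySem.Chars.join_nil]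

theorem pvSpacedA_singleton (c : Char) : pvSpacedA [c] = [c] := by
  simp [pvSpacedA, PySem.Chars.join_singleton]

theorem pvSpacedA_cons_cons (c c2 : Char) (t : List Char) :
    pvSpacedA (c :: c2 :: t) = c :: ' ' :: pvSpacedA (c2 :: t) := by
  simp [pvSpacedA, PySem.Chars.join_cons_cons]

theorem length_pvSpacedA : ∀ (t : List Char), t ≠ [] → (pvSpacedA t).length = 2 * t.length - 1
  | [c], _ => by simp [pvSpacedA_singleton]
  | c :: c2 :: t, _ => by
    have ih := length_pvSpacedA (c2 :: t) (by simp)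
    rw [pvSpacedA_cons_cons]
    simp only [List.length_cons] at ih ⊢
    omega

theorem pvSpacedA_inj : ∀ {t1 t2 : List Char}, pvSpacedA t1 = pvSpacedA t2 → t1 = t2
  | [], [], _ => rfl
  | [], c :: t, h => by
    have := length_pvSpacedA (c :: t) (by simp)
    rw [pvSpacedA_nil] at h
    have hl : (pvSpacedA (c :: t)).length = 0 := by rw [← h]; rfl
    rw [length_pvSpacedA (c :: t) (by simp)] at hl
    simp only [List.length_cons] at hl
    omega
  | c :: t, [], h => by
    rw [pvSpacedA_nil] at h
    have hl : (pvSpacedA (c :: t)).length = 0 := by rw [h]; rfl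
    rw [length_pvSpacedA (c :: t) (by simp)] at hl
    simp only [List.length_cons] at hl
    omega
  | [c], [d], h => by
    rw [pvSpacedA_singleton, pvSpacedA_singleton] at h
    simpa using h
  | [c], d :: d2 :: s, h => by
    rw [pvSpacedA_singleton, pvSpacedA_cons_cons] at h
    simp at h
  | c :: c2 :: t, [d], h => by
    rw [pvSpacedA_singleton, pvSpacedA_cons_cons] at h
    simp at h
  | c :: c2 :: t, d :: d2 :: s, h => by
    rw [pvSpacedA_cons_cons, pvSpacedA_cons_cons] at h
    simp only [List.cons.injEq] at h
    obtain ⟨rfl, -, h2⟩ := h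
    have := pvSpacedA_inj h2
    simp_all

theorem startswith_spaced : ∀ (tok rest : List Char),
    PySem.Chars.startswith rest (pvSpacedA tok) = pvStartsSpaced tok rest
  | [], rest => by
    rw [pvSpacedA_nil, Bool.eq_iff_iff, PySem.Chars.startswith_iff]
    simp [pvStartsSpaced]
  | [c], rest => by
    rw [pvSpacedA_singleton, Bool.eq_iff_iff, PySem.Chars.startswith_iff]
    cases rest with
    | nil => simp [pvStartsSpaced]
    | cons d rs => simp [pvStartsSpaced, List.cons_prefix_cons]
  | c :: c2 :: t, rest => by
    rw [pvSpacedA_cons_cons, Bool.eq_iff_iff, PySem.Chars.startswith_iff]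
    match rest with
    | [] => simp [pvStartsSpaced]
    | [d] => simp [pvStartsSpaced, List.cons_prefix_cons]
    | d :: e :: rs =>
      rw [List.cons_prefix_cons, List.cons_prefix_cons, ← PySem.Chars.startswith_iff,
        startswith_spaced (c2 :: t) rs]
      show _ ↔ (c == d && (e == ' ') && pvStartsSpaced (c2 :: t) rs) = true
      simp only [Bool.and_eq_true, beq_iff_eq, and_assoc]
      constructor
      · rintro ⟨rfl, h1, h2⟩; exact ⟨rfl, h1.symm, h2⟩
      · rintro ⟨rfl, h1, h2⟩; exact ⟨rfl, h1.symm, h2⟩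

-- pvFirstMatch spec
theorem pvFirstMatch_some {rest : List Char} {l : List (List Char × List Char × Nat)} {x}
    (hp : l.Pairwise (fun a b => b.2.2 ≤ a.2.2))
    (h : pvFirstMatch rest l = some x) :
    x ∈ l ∧ PySem.Chars.startswith rest x.2.1 = true ∧
      ∀ y ∈ l, PySem.Chars.startswith rest y.2.1 = true → y.2.2 ≤ x.2.2 := by
  induction l with
  | nil => simp [pvFirstMatch] at h
  | cons z zs ih =>
    rw [pvFirstMatch] at h
    rw [List.pairwise_cons] at hp
    by_cases hz : PySem.Chars.startswith rest z.2.1 = true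
    · rw [if_pos hz, Option.some.injEq] at h
      subst h
      refine ⟨by simp, hz, ?_⟩
      intro y hy hm
      rcases List.mem_cons.mp hy with rfl | hy'
      · exact le_refl _
      · exact hp.1 y hy' 
    · rw [if_neg hz] at h
      obtain ⟨h1, h2, h3⟩ := ih hp.2 h
      refine ⟨by simp [h1], h2, ?_⟩
      intro y hy hm
      rcases List.mem_cons.mp hy with rfl | hy'
      · exact absurd hm hz
      · exact h3 y hy' hm

theorem pvFirstMatch_isSome {rest : List Char} {l : List (List Char × List Char × Nat)} {y}
    (hy : y ∈ l) (h : PySem.Chars.startswith rest y.2.1 = true) :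
    pvFirstMatch rest l ≠ none := by
  induction l with
  | nil => simp at hy
  | cons z zs ih =>
    rw [pvFirstMatch]
    by_cases hz : PySem.Chars.startswith rest z.2.1 = true
    · simp [hz]
    · rw [if_neg hz]
      rcases List.mem_cons.mp hy with rfl | hy'
      · exact absurd h hz
      · exact ih hy' 

-- pvBest spec (proved through the named step function pvStep)
def pvStep (rest : List Char) (best : Option (List Char)) (tok : List Char) : Option (List Char) :=
  if (!tok.isEmpty)
      && (match best with | none => true | some b => b.length < tok.length)
      && pvStartsSpaced tok rest then some tok else best

-- a successful match fixes the first character, so the pre-filter is redundant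
theorem pvStartsSpaced_head : ∀ (t rest : List Char), pvStartsSpaced t rest = true →
    t ≠ [] → (t.head? == rest.head?) = true
  | [c], d :: rs, h, _ => by
    simp only [pvStartsSpaced] at h
    simp [h]
  | c :: c2 :: t', d :: e :: rs, h, _ => by
    simp only [pvStartsSpaced, Bool.and_eq_true, beq_iff_eq] at h
    simp [h.1.1]

theorem pvBestStep_eq (rest : List Char) :
    (fun (best : Option (List Char)) (tok : List Char) =>
      if (!tok.isEmpty) && (tok.head? == rest.head?)
          && (match best with | none => true | some b => b.length < tok.length)
          && pvStartsSpaced tok rest then some tok else best)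
      = pvStep rest := by
  funext best tok
  rw [pvStep.eq_def]
  by_cases hs : pvStartsSpaced tok rest = true
  · cases tok with
    | nil => simp
    | cons t0 t' =>
      have hh' : rest.head? = some t0 := by
        have h2 := beq_iff_eq.mp (pvStartsSpaced_head (t0 :: t') rest hs (by simp))
        rw [List.head?_cons] at h2
        exact h2.symm
      rw [hh']
      simp only [List.head?_cons, beq_self_eq_true, Bool.and_true]
  · rw [Bool.not_eq_true] at hs
    simp [hs]

theorem pvBest_eq (toks : List (List Char)) (rest : List Char) :
    pvBest toks rest = toks.foldl (pvStep rest) none := by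
  rw [pvBest, pvBestStep_eq]

-- monotonicity: once some, stays some and never shrinks
theorem pvStep_mono (rest : List Char) : ∀ (toks : List (List Char)) (b : List Char),
    ∃ r, toks.foldl (pvStep rest) (some b) = some r ∧ b.length ≤ r.length
  | [], b => ⟨b, rfl, le_refl _⟩
  | t :: ts, b => by
    rw [List.foldl_cons, pvStep]
    split_ifs with hc
    · obtain ⟨r, hr, hlen⟩ := pvStep_mono rest ts t
      simp only [Bool.and_eq_true, decide_eq_true_eq] at hc
      exact ⟨r, hr, le_of_lt (lt_of_lt_of_le hc.1.2 hlen)⟩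
    · exact pvStep_mono rest ts b

-- a good accumulator yields a good result from the accumulator or the list
theorem pvStep_good (rest : List Char) : ∀ (toks : List (List Char)) (b r : List Char),
    b ≠ [] → pvStartsSpaced b rest = true →
    toks.foldl (pvStep rest) (some b) = some r →
    (r ≠ [] ∧ pvStartsSpaced r rest = true) ∧ (r ∈ toks ∨ r = b)
  | [], b, r, hb1, hb2, h => by
    rw [List.foldl_nil, Option.some.injEq] at h
    exact ⟨⟨h ▸ hb1, h ▸ hb2⟩, Or.inr h.symm⟩
  | t :: ts, b, r, hb1, hb2, h => by
    rw [List.foldl_cons, pvStep] at h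
    split_ifs at h with hc
    · simp only [Bool.and_eq_true, Bool.not_eq_true', List.isEmpty_eq_false_iff] at hc
      obtain ⟨hg, hmem⟩ := pvStep_good rest ts t r hc.1.1 hc.2 h
      refine ⟨hg, Or.inl ?_⟩
      rcases hmem with hm | rfl
      · exact List.mem_cons_of_mem _ hm
      · exact List.mem_cons_self
    · obtain ⟨hg, hmem⟩ := pvStep_good rest ts b r hb1 hb2 h
      refine ⟨hg, ?_⟩
      rcases hmem with hm | rfl
      · exact Or.inl (List.mem_cons_of_mem _ hm)
      · exact Or.inr rfl

-- none result: nothing good was seen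
theorem pvStep_none (rest : List Char) : ∀ (toks : List (List Char)) (acc : Option (List Char)),
    toks.foldl (pvStep rest) acc = none →
    acc = none ∧ ∀ t ∈ toks, t ≠ [] → ¬ pvStartsSpaced t rest = true
  | [], acc, h => ⟨h, by simp⟩
  | t :: ts, acc, h => by
    rw [List.foldl_cons] at h
    obtain ⟨hstep, hts⟩ := pvStep_none rest ts _ h
    rw [pvStep.eq_def] at hstep
    split_ifs at hstep with hc
    refine ⟨hstep, ?_⟩
    intro t' ht' hne
    rcases List.mem_cons.mp ht' with rfl | h'
    · subst hstep
      intro hs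
      exact hc (by simp [hne, hs])
    · exact hts t' h' hne

-- the result bounds every good token
theorem pvStep_bound (rest : List Char) : ∀ (toks : List (List Char)) (acc : Option (List Char)) (r : List Char),
    toks.foldl (pvStep rest) acc = some r →
    ∀ t ∈ toks, t ≠ [] → pvStartsSpaced t rest = true → t.length ≤ r.length
  | [], _, _, _ => by simp
  | t :: ts, acc, r, h => by
    intro t' ht' hne hs
    rw [List.foldl_cons] at h
    rcases List.mem_cons.mp ht' with rfl | h'
    · rw [pvStep.eq_def] at h
      split_ifs at h with hc
      · obtain ⟨r', hr', hlen⟩ := pvStep_mono rest ts t'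
        rw [hr', Option.some.injEq] at h
        exact h ▸ hlen
      · match acc with
        | none => exact absurd (by simp [hne, hs]) hc
        | some bb =>
          have hbb : ¬ bb.length < t'.length := by
            intro hlt
            exact hc (by simp [hne, hs, hlt])
          obtain ⟨r', hr', hlen⟩ := pvStep_mono rest ts bb
          rw [hr', Option.some.injEq] at h
          obtain rfl := h
          omega
    · exact pvStep_bound rest ts _ r h t' h' hne hs

theorem pvBest_none {toks : List (List Char)} {rest : List Char}
    (h : pvBest toks rest = none) :
    ∀ t ∈ toks, t ≠ [] → ¬ pvStartsSpaced t rest = true := by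
  rw [pvBest_eq] at h
  exact (pvStep_none rest toks none h).2

theorem pvBest_some {toks : List (List Char)} {rest : List Char} {b : List Char}
    (h : pvBest toks rest = some b) :
    b ∈ toks ∧ b ≠ [] ∧ pvStartsSpaced b rest = true ∧
      ∀ t ∈ toks, t ≠ [] → pvStartsSpaced t rest = true → t.length ≤ b.length := by
  rw [pvBest_eq] at h
  have hbound := pvStep_bound rest toks none b h
  have hmem : b ∈ toks ∧ b ≠ [] ∧ pvStartsSpaced b rest = true := by
    clear hbound
    induction toks with
    | nil => simp [List.foldl_nil] at h
    | cons t ts ih =>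
      rw [List.foldl_cons, pvStep] at h
      split_ifs at h with hc
      · simp only [Bool.and_eq_true, Bool.not_eq_true', List.isEmpty_eq_false_iff] at hc
        obtain ⟨hg, hm⟩ := pvStep_good rest ts t b hc.1.1 hc.2 h
        refine ⟨?_, hg.1, hg.2⟩
        rcases hm with hm' | rfl
        · exact List.mem_cons_of_mem _ hm'
        · exact List.mem_cons_self
      · obtain ⟨h1, h2, h3⟩ := ih h
        exact ⟨by simp [h1], h2, h3⟩
  exact ⟨hmem.1, hmem.2.1, hmem.2.2, hbound⟩

-- the main loop equivalence
theorem loop_eq (toks : List (List Char))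
    (fuel : Nat) (rest : List Char)
    (hOK : (∀ t ∈ toks, t ≠ []) ∨ (∀ c ∈ rest, [c] ∈ toks)) :
    pvLoopA (PySem.List.sorted (toks.map (fun t => (t, pvSpacedA t, (pvSpacedA t).length)))
        (fun x => -(x.2.2 : Int)) false) fuel rest
      = pvLoopB toks fuel rest := by
  set f : List Char → List Char × List Char × Nat :=
    fun t => (t, pvSpacedA t, (pvSpacedA t).length) with hf
  set S := PySem.List.sorted (toks.map f) (fun x => -(x.2.2 : Int)) false with hS
  have hp : S.Pairwise (fun a b => b.2.2 ≤ a.2.2) :=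
    (PySem.List.sorted_pairwise (toks.map f) (fun x => -(x.2.2 : Int))).imp
      (fun h => Nat.cast_le.mp (neg_le_neg_iff.mp h))
  have hmemS : ∀ y, y ∈ S ↔ y ∈ toks.map f := fun y =>
    PySem.List.mem_sorted (toks.map f) (fun x => -(x.2.2 : Int)) false y
  induction fuel generalizing rest with
  | zero => cases rest <;> rfl
  | succ fuel ih =>
    cases rest with
    | nil => rfl
    | cons c rs =>
      have hOKtail : ∀ rs' : List Char, (∀ c' ∈ rs', c' ∈ c :: rs) →
          ((∀ t ∈ toks, t ≠ []) ∨ (∀ c' ∈ rs', [c'] ∈ toks)) := by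
        rcases hOK with hne | hch
        · exact fun _ _ => Or.inl hne
        · exact fun rs' hsub => Or.inr fun c' hc' => hch c' (hsub c' hc')
      rw [pvLoopA, pvLoopB]
      cases hFM : pvFirstMatch (c :: rs) S with
      | none =>
        have hB : pvBest toks (c :: rs) = none := by
          cases hB : pvBest toks (c :: rs) with
          | none => rfl
          | some b =>
            obtain ⟨hb1, hb2, hb3, -⟩ := pvBest_some hB
            have hmem : f b ∈ S := (hmemS (f b)).mpr (List.mem_map_of_mem hb1)
            have hsw : PySem.Chars.startswith (c :: rs) (f b).2.1 = true := by
              rw [hf]; dsimp only; rw [startswith_spaced]; exact hb3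
            exact absurd hFM (pvFirstMatch_isSome hmem hsw)
        rw [hB]
        exact congrArg _ (ih rs (hOKtail rs fun c' hc' => List.mem_cons_of_mem _ hc'))
      | some x =>
        obtain ⟨hxS, hxsw, hxmax⟩ := pvFirstMatch_some hp hFM
        obtain ⟨tok, htok, hftok⟩ := List.mem_map.mp ((hmemS x).mp hxS)
        obtain ⟨rfl⟩ : f tok = x := hftok
        have htokne : tok ≠ [] := by
          rcases hOK with hne | hch
          · exact hne tok htok
          · intro hnil
            subst hnil
            have hc1 : [c] ∈ toks := hch c List.mem_cons_self
            have hmem : f [c] ∈ S := (hmemS (f [c])).mpr (List.mem_map_of_mem hc1)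
            have hsw : PySem.Chars.startswith (c :: rs) (f [c]).2.1 = true := by
              rw [hf]; dsimp only; rw [startswith_spaced]; simp [pvStartsSpaced]
            have hle := hxmax (f [c]) hmem hsw
            rw [hf] at hle
            dsimp only at hle
            rw [pvSpacedA_singleton, pvSpacedA_nil] at hle
            simp at hle
        have hstok : pvStartsSpaced tok (c :: rs) = true := by
          rw [← startswith_spaced]; exact hxsw
        cases hB : pvBest toks (c :: rs) with
        | none => exact absurd hstok (pvBest_none hB tok htok htokne)
        | some b =>
          obtain ⟨hb1, hb2, hb3, hbmax⟩ := pvBest_some hB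
          -- b and tok are both matches of maximal length, hence equal
          have h1 : tok.length ≤ b.length := hbmax tok htok htokne hstok
          have h2 : b.length ≤ tok.length := by
            have hmem : f b ∈ S := (hmemS (f b)).mpr (List.mem_map_of_mem hb1)
            have hsw : PySem.Chars.startswith (c :: rs) (f b).2.1 = true := by
              rw [hf]; dsimp only; rw [startswith_spaced]; exact hb3
            have := hxmax (f b) hmem hsw
            rw [hf] at this; dsimp only at this
            rw [length_pvSpacedA b hb2, length_pvSpacedA tok htokne] at this
            omega
          have hlen : b.length = tok.length := le_antisymm h2 h1
          have hpre1 : pvSpacedA b <+: (c :: rs) := by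
            rw [← PySem.Chars.startswith_iff, startswith_spaced]; exact hb3
          have hpre2 : pvSpacedA tok <+: (c :: rs) := by
            rw [← PySem.Chars.startswith_iff, startswith_spaced]; exact hstok
          have hsplen : (pvSpacedA b).length = (pvSpacedA tok).length := by
            rw [length_pvSpacedA b hb2, length_pvSpacedA tok htokne, hlen]
          have hbeq : b = tok :=
            pvSpacedA_inj ((List.prefix_of_prefix_length_le hpre1 hpre2 hsplen.le).eq_of_length hsplen)
          subst hbeq
          rw [hf]
          dsimp only
          rw [length_pvSpacedA b hb2]
          exact congrArg _ (ih _ (hOKtail _ fun c' hc' => List.mem_of_mem_drop hc'))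

-- ===== VERDICT (by name: the statement is the Claim_ definition above) =====
theorem merge_spaced_tokens_py_spec : Claim_equal_merge_spaced_tokens_py := by
  intro text tokens _ hpre
  unfold Spec_merge_spaced_tokens_py merge_spaced_tokens_py merge_spaced_tokens_py_alt
  rcases hpre with rfl | hne | hch
  · simp [pvLoopA, pvLoopB]
  · have hne' : ∀ t ∈ tokens.map String.toList, t ≠ [] := by
      intro t ht
      obtain ⟨s, hs, rfl⟩ := List.mem_map.mp ht
      intro hnil
      exact hne s hs (String.toList_inj.mp (by simp [hnil]))
    have := loop_eq (tokens.map String.toList) text.toList.length text.toList (Or.inl hne')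
    rw [List.map_map] at this
    exact congrArg String.mk this
  · have := loop_eq (tokens.map String.toList) text.toList.length text.toList (Or.inr hch)
    rw [List.map_map] at this
    exact congrArg String.mk this
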